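-- pv_equiv track=rewrite | github.com/AidenHerrera1031/Sudo-ID | brain_tui.py | _extract_raw_result_block
-- ===== SOURCE A (Python) =====
-- def _extract_raw_result_block(lines: list[str], source_name: str) -> list[str]:
--     out = []
--     capturing = False
--     target = f"source={source_name}"
--     for raw in lines:
--         line = str(raw or "").rstrip("\n")
--         stripped = line.strip()
--         if stripped.startswith("[") and "source=" in stripped:
--             if capturing:
--                 break
--             if target in stripped:
--                 capturing = True
--         if capturing:
--             out.append(line)
--     return out
-- ===== SOURCE B (Python) =====
-- def _is_header(line):
--     s = line.strip()
--     return s.startswith("[") and "source=" in s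
--
--
-- def _extract_raw_result_block(lines: list[str], source_name: str) -> list[str]:
--     target = f"source={source_name}"
--     t = [str(raw or "").rstrip("\n") for raw in lines]
--     i = next((k for k, l in enumerate(t)
--               if _is_header(l) and target in l.strip()), None)
--     if i is None:
--         return []
--     rest = t[i + 1:]
--     n = next((k for k, l in enumerate(rest) if _is_header(l)), len(rest))
--     return t[i : i + 1 + n]
-- ===== Notes on version B (the rewrite author's own statement) =====
-- stated objective: alternative
-- what changed: Replaces the single pass threading a capturing flag (with break) by boundary location: transform all lines once, find the index of the matching source header, find the next header after it, and return the slice between them.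
import Mathlib
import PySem

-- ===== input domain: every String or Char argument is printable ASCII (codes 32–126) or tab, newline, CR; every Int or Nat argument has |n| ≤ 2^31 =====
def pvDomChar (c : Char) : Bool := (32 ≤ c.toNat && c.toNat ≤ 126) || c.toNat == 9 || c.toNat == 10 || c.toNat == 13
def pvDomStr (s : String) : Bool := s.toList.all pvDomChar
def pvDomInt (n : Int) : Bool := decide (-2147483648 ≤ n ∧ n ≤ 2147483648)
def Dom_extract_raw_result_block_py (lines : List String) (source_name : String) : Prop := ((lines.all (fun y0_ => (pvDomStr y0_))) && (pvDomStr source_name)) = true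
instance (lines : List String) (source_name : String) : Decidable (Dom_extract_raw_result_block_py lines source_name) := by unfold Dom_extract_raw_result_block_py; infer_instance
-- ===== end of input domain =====

-- B finds the block boundaries (matching header index, next header index) and slices the
-- transformed line list, instead of A's single pass threading a capturing flag with break.

-- shared low-level line transformation: str(raw or "").rstrip("\n")
-- (rstrip("\n") is ported by hand — exact: drops exactly the trailing '\n' characters)
def pvLineTx (raw : String) : String :=
  String.ofList (((if raw = "" then "" else raw).toList.reverse.dropWhile (· == '\n')).reverse)

-- ===== PORT A =====
def pvALoop (target : String) : List String → Bool → List String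
  | [], _ => []
  | raw :: rest, capturing =>
    let line := pvLineTx raw
    let stripped := PySem.Str.strip line
    if PySem.Str.startswith stripped "[" && PySem.Str.isIn "source=" stripped then
      if capturing then []   -- break: return out as accumulated so far
      else if PySem.Str.isIn target stripped then
        line :: pvALoop target rest true   -- capturing := True; `if capturing: out.append(line)`
      else
        pvALoop target rest false
    else
      if capturing then line :: pvALoop target rest capturing
      else pvALoop target rest capturing

def extract_raw_result_block_py (lines : List String) (source_name : String) : List String :=
  pvALoop ("source=" ++ source_name) lines false

-- ===== PORT B =====
def pvIsHeader (line : String) : Bool :=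
  let s := PySem.Str.strip line
  PySem.Str.startswith s "[" && PySem.Str.isIn "source=" s

def extract_raw_result_block_py_alt (lines : List String) (source_name : String) : List String :=
  let target := "source=" ++ source_name
  let t := lines.map pvLineTx
  match t.findIdx? (fun l => pvIsHeader l && PySem.Str.isIn target (PySem.Str.strip l)) with
  | none => []
  | some i =>
    let rest := t.drop (i + 1)        -- t[i+1:] with a nonnegative in-range index
    let n := (rest.findIdx? pvIsHeader).getD rest.length
    PySem.List.slice t (some (i : Int)) (some ((i : Int) + 1 + (n : Int)))   -- t[i : i+1+n]

-- ===== PRECONDITION & SPEC =====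
def Spec_extract_raw_result_block_py (lines : List String) (source_name : String) (out : List String) : Prop := out = extract_raw_result_block_py_alt lines source_name
instance (lines : List String) (source_name : String) (out : List String) : Decidable (Spec_extract_raw_result_block_py lines source_name out) := by unfold Spec_extract_raw_result_block_py; infer_instance

-- ===== CLAIM (what is proved, stated in full; the proofs are below) =====
def Claim_equal_extract_raw_result_block_py : Prop := ∀ (lines : List String) (source_name : String), Dom_extract_raw_result_block_py lines source_name → Spec_extract_raw_result_block_py lines source_name (extract_raw_result_block_py lines source_name)

-- ===== LEMMAS AND PROOFS =====

-- unfold pvALoop one step (cap = false), the three shapes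
theorem pvALoop_cons_hit (target raw : String) (rest : List String)
    (hhdr : (PySem.Str.startswith (PySem.Str.strip (pvLineTx raw)) "[" &&
        PySem.Str.isIn "source=" (PySem.Str.strip (pvLineTx raw))) = true)
    (htgt : PySem.Str.isIn target (PySem.Str.strip (pvLineTx raw)) = true) :
    pvALoop target (raw :: rest) false = pvLineTx raw :: pvALoop target rest true := by
  simp only [pvALoop]
  rw [if_pos hhdr, if_neg (by decide), if_pos htgt]

theorem pvALoop_cons_skip (target raw : String) (rest : List String)
    (hp : ¬ (pvIsHeader (pvLineTx raw) &&
        PySem.Str.isIn target (PySem.Str.strip (pvLineTx raw))) = true) :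
    pvALoop target (raw :: rest) false = pvALoop target rest false := by
  simp only [pvALoop]
  by_cases hhdr : (PySem.Str.startswith (PySem.Str.strip (pvLineTx raw)) "[" &&
      PySem.Str.isIn "source=" (PySem.Str.strip (pvLineTx raw))) = true
  · have hph : pvIsHeader (pvLineTx raw) = true := hhdr
    have htgt : PySem.Str.isIn target (PySem.Str.strip (pvLineTx raw)) = false := by
      cases hc : PySem.Str.isIn target (PySem.Str.strip (pvLineTx raw)) with
      | false => rfl
      | true =>
        exact absurd (show (pvIsHeader (pvLineTx raw) &&
          PySem.Str.isIn target (PySem.Str.strip (pvLineTx raw))) = true by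
            simp only [hph, hc, Bool.and_self]) hp
    rw [if_pos hhdr, if_neg (by decide),
      if_neg (show ¬ PySem.Str.isIn target (PySem.Str.strip (pvLineTx raw)) = true by
        rw [htgt]; exact Bool.false_ne_true)]
  · rw [if_neg hhdr, if_neg (by decide)]

-- with capturing = True, A's loop takes lines up to (excluding) the next header
theorem pvALoop_true (target : String) (ls : List String) :
    pvALoop target ls true = (ls.map pvLineTx).takeWhile (fun l => !pvIsHeader l) := by
  induction ls with
  | nil => rfl
  | cons raw rest ih =>
    simp only [pvALoop, List.map_cons, List.takeWhile_cons]
    by_cases h : (PySem.Str.startswith (PySem.Str.strip (pvLineTx raw)) "[" &&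
        PySem.Str.isIn "source=" (PySem.Str.strip (pvLineTx raw))) = true
    · have hph : pvIsHeader (pvLineTx raw) = true := h
      rw [if_pos h, if_pos trivial,
        if_neg (show ¬ (!pvIsHeader (pvLineTx raw)) = true by rw [hph]; decide)]
    · have hph : pvIsHeader (pvLineTx raw) = false := Bool.of_not_eq_true h
      rw [if_neg h, if_pos trivial,
        if_pos (show (!pvIsHeader (pvLineTx raw)) = true by rw [hph]; rfl), ih]

-- take up to the first index where q holds = takeWhile (not q)
theorem take_findIdx?_getD {α : Type} (q : α → Bool) (xs : List α) :
    xs.take ((xs.findIdx? q).getD xs.length) = xs.takeWhile (fun x => !q x) := by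
  induction xs with
  | nil => rfl
  | cons x rest ih =>
    by_cases h : q x = true
    · simp [List.findIdx?_cons, h]
    · simp only [List.findIdx?_cons, h, List.takeWhile_cons, Bool.not_eq_true']
      cases hf : rest.findIdx? q with
      | none => simpa [hf, h] using by simpa [hf] using ih
      | some k => simpa [hf, h] using by simpa [hf] using ih

-- the slice t[i : i+1+n] with natural bounds is (drop i).take (1+n)
theorem pvSlice_eq (t : List String) (i n : Nat) :
    PySem.List.slice t (some (i : Int)) (some ((i : Int) + 1 + (n : Int)))
      = (t.drop i).take (1 + n) := by
  have h : ((i : Int) + 1 + (n : Int)) = (((i + 1 + n : Nat) : Int)) := by push_cast; ring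
  rw [h, PySem.List.slice_natCast]
  congr 1
  omega

theorem pvALoop_false (target : String) (ls : List String) :
    pvALoop target ls false =
      (match (ls.map pvLineTx).findIdx?
          (fun l => pvIsHeader l && PySem.Str.isIn target (PySem.Str.strip l)) with
      | none => []
      | some i =>
        let t := ls.map pvLineTx
        let rest := t.drop (i + 1)
        let n := (rest.findIdx? pvIsHeader).getD rest.length
        PySem.List.slice t (some (i : Int)) (some ((i : Int) + 1 + (n : Int)))) := by
  induction ls with
  | nil => rfl
  | cons raw rest ih =>
    by_cases hp : (pvIsHeader (pvLineTx raw) &&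
        PySem.Str.isIn target (PySem.Str.strip (pvLineTx raw))) = true
    · have hhdr : (PySem.Str.startswith (PySem.Str.strip (pvLineTx raw)) "[" &&
          PySem.Str.isIn "source=" (PySem.Str.strip (pvLineTx raw))) = true :=
        ((Bool.and_eq_true _ _).mp hp).1
      have htgt : PySem.Str.isIn target (PySem.Str.strip (pvLineTx raw)) = true :=
        ((Bool.and_eq_true _ _).mp hp).2
      rw [pvALoop_cons_hit target raw rest hhdr htgt, pvALoop_true]
      simp only [List.map_cons, List.findIdx?_cons]
      rw [if_pos hp]
      simp only [List.drop_succ_cons, List.drop_zero]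
      rw [pvSlice_eq]
      simp only [List.drop_zero, Nat.add_comm 1, List.take_succ_cons]
      rw [take_findIdx?_getD]
    · rw [pvALoop_cons_skip target raw rest hp, ih]
      simp only [List.map_cons, List.findIdx?_cons]
      rw [if_neg hp]
      cases hf : (rest.map pvLineTx).findIdx?
          (fun l => pvIsHeader l && PySem.Str.isIn target (PySem.Str.strip l)) with
      | none => simp
      | some k =>
        simp only [Option.map_some, List.drop_succ_cons]
        rw [pvSlice_eq, pvSlice_eq, List.drop_succ_cons]

-- ===== VERDICT (by name: the statement is the Claim_ definition above) =====
theorem extract_raw_result_block_py_spec : Claim_equal_extract_raw_result_block_py := by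
  intro lines source_name _
  unfold Spec_extract_raw_result_block_py extract_raw_result_block_py extract_raw_result_block_py_alt
  exact pvALoop_false _ _
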